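-- pv_equiv track=rewrite | github.com/sublime09/ALJI | Scholastic Pull/storyWork.py | genStripLongBlanks
-- ===== SOURCE A (Python) =====
-- def genStripLongBlanks(storyLines):
-- 	blankLinesInARow = 0
-- 	for line in storyLines:
-- 		line = line.rstrip()
-- 		if len(line) == 0:
-- 			blankLinesInARow += 1
-- 			if blankLinesInARow == 2:
-- 				yield ""
-- 		else:
-- 			yield line
-- 			blankLinesInARow = 0
-- ===== SOURCE B (Python) =====
-- def genStripLongBlanks(storyLines):
--     # Run-based rewrite: strip everything first, then consume runs of blanks
--     # at once, emitting one "" per run of length >= 2.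
--     lines = [l.rstrip() for l in storyLines]
--     n = len(lines)
--     i = 0
--     while i < n:
--         line = lines[i]
--         if line:
--             yield line
--             i += 1
--         else:
--             k = 0
--             i += 1
--             while i < n and not lines[i]:
--                 k += 1
--                 i += 1
--             if k + 1 >= 2:
--                 yield ""
-- ===== Notes on version B (the rewrite author's own statement) =====
-- stated objective: alternative
-- what changed: Replaces the stateful blank-counter single pass by a run-based scan: strip all lines first, then consume each maximal run of blank lines at once, emitting one empty string per run of length >= 2.
import Mathlib
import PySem

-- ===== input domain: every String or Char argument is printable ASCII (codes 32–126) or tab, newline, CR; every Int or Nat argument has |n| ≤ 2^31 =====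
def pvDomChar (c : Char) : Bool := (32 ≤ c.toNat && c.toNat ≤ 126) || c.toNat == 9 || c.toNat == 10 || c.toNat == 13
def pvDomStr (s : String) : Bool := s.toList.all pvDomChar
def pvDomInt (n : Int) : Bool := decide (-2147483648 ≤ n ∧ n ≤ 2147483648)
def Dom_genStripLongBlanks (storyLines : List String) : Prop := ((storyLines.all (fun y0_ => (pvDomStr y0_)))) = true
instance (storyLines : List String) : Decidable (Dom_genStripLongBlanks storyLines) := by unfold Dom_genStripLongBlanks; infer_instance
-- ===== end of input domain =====

-- B is a run-based rewrite of A's stateful blank-counter pass (alternative decomposition, same cost).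

-- ===== PORT A =====
-- A: one pass, a blankLinesInARow counter; yields "" exactly when the counter hits 2.
def genStripLongBlanks (storyLines : List String) : List String :=
  (storyLines.foldl
    (fun (st : List String × Int) line =>
      let line := PySem.Str.rstrip line
      if PySem.Str.len line == 0 then
        (st.1 ++ (if st.2 + 1 == 2 then [""] else []), st.2 + 1)
      else
        (st.1 ++ [line], (0 : Int)))
    ([], 0)).1

-- ===== PORT B =====
-- inner while-loop of Source B: count the further leading blanks, return (count, rest)
def pvSkipBlanks : List String → Nat × List String
  | [] => (0, [])
  | l :: ls => if l = "" then ((pvSkipBlanks ls).1 + 1, (pvSkipBlanks ls).2) else (0, l :: ls)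

theorem pvSkipBlanks_len_le : ∀ ls : List String, (pvSkipBlanks ls).2.length ≤ ls.length := by
  intro ls
  induction ls with
  | nil => simp [pvSkipBlanks]
  | cons l ls ih =>
      simp only [pvSkipBlanks]
      split <;> simp <;> omega

-- outer while-loop of Source B over the pre-stripped lines
def pvEmitRuns : List String → List String
  | [] => []
  | l :: ls =>
    if l ≠ "" then l :: pvEmitRuns ls
    else
      (if (pvSkipBlanks ls).1 + 1 ≥ 2 then [""] else []) ++ pvEmitRuns (pvSkipBlanks ls).2
termination_by l => l.length
decreasing_by
  · simp
  · have := pvSkipBlanks_len_le ls; simp; omega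

def genStripLongBlanks_alt (storyLines : List String) : List String :=
  pvEmitRuns (storyLines.map PySem.Str.rstrip)

-- ===== PRECONDITION & SPEC =====
def Spec_genStripLongBlanks (storyLines : List String) (out : List String) : Prop := out = genStripLongBlanks_alt storyLines
instance (storyLines : List String) (out : List String) : Decidable (Spec_genStripLongBlanks storyLines out) := by unfold Spec_genStripLongBlanks; infer_instance

-- ===== CLAIM (what is proved, stated in full; the proofs are below) =====
def Claim_equal_genStripLongBlanks : Prop := ∀ (storyLines : List String), Dom_genStripLongBlanks storyLines → Spec_genStripLongBlanks storyLines (genStripLongBlanks storyLines)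

-- ===== LEMMAS AND PROOFS =====

-- A's loop, written recursively (counter b = blankLinesInARow)
def pvGA (b : Int) : List String → List String
  | [] => []
  | x :: xs =>
    let x' := PySem.Str.rstrip x
    if PySem.Str.len x' == 0 then
      (if b + 1 == 2 then [""] else []) ++ pvGA (b + 1) xs
    else
      x' :: pvGA 0 xs

theorem pvFoldl_eq_gA : ∀ (l : List String) (acc : List String) (b : Int),
    (l.foldl
      (fun (st : List String × Int) line =>
        let line := PySem.Str.rstrip line
        if PySem.Str.len line == 0 then
          (st.1 ++ (if st.2 + 1 == 2 then [""] else []), st.2 + 1)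
        else
          (st.1 ++ [line], (0 : Int)))
      (acc, b)).1 = acc ++ pvGA b l := by
  intro l
  induction l with
  | nil => intro acc b; simp [pvGA]
  | cons x xs ih =>
      intro acc b
      rw [List.foldl_cons]
      dsimp only [pvGA]
      by_cases h : (PySem.Str.len (PySem.Str.rstrip x) == 0) = true
      · rw [if_pos h, if_pos h, ih, List.append_assoc]
      · rw [if_neg h, if_neg h, ih]
        simp

theorem pvLen_eq_zero_iff (s : String) : (PySem.Str.len s == 0) = true ↔ s = "" := by
  constructor
  · intro h
    have : s.toList = [] := by
      have hl := PySem.Str.len_eq s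
      simp only [beq_iff_eq] at h
      rw [hl] at h
      exact List.length_eq_zero_iff.mp (by exact_mod_cast h)
    cases s; simp_all [String.toList]
  · intro h; subst h; decide

-- the combined run-structure invariant, by strong induction on length:
-- (1) fresh state, (2) after one blank seen, (3) deep inside a run (b ≥ 2)
theorem pvTriple : ∀ (n : Nat) (l : List String), l.length ≤ n →
    (pvGA 0 l = pvEmitRuns (l.map PySem.Str.rstrip)) ∧
    (pvGA 1 l = (if (pvSkipBlanks (l.map PySem.Str.rstrip)).1 + 1 ≥ 2 then [""] else [])
        ++ pvEmitRuns (pvSkipBlanks (l.map PySem.Str.rstrip)).2) ∧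
    (∀ b : Int, 2 ≤ b → pvGA b l = pvEmitRuns (pvSkipBlanks (l.map PySem.Str.rstrip)).2) := by
  intro n
  induction n with
  | zero =>
      intro l hl
      have : l = [] := List.length_eq_zero_iff.mp (Nat.le_zero.mp hl)
      subst this
      exact ⟨by simp [pvGA, pvEmitRuns], by simp [pvGA, pvSkipBlanks, pvEmitRuns], fun b hb => by simp [pvGA, pvSkipBlanks, pvEmitRuns]⟩
  | succ n ih =>
      intro l hl
      cases l with
      | nil =>
          exact ⟨by simp [pvGA, pvEmitRuns], by simp [pvGA, pvSkipBlanks, pvEmitRuns], fun b hb => by simp [pvGA, pvSkipBlanks, pvEmitRuns]⟩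
      | cons x xs =>
          have hxs : xs.length ≤ n := by simpa using Nat.succ_le_succ_iff.mp hl
          obtain ⟨ih1, ih2, ih3⟩ := ih xs hxs
          by_cases hx : PySem.Str.rstrip x = ""
          · have hlen : (PySem.Str.len (PySem.Str.rstrip x) == 0) = true := (pvLen_eq_zero_iff _).mpr hx
            refine ⟨?_, ?_, ?_⟩
            · dsimp only [pvGA, List.map_cons]
              rw [if_pos hlen, hx, pvEmitRuns]
              simp only [ne_eq, not_true_eq_false, if_false]
              simpa using ih2
            · dsimp only [pvGA, List.map_cons]
              rw [if_pos hlen]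
              simp only [hx, pvSkipBlanks, if_pos rfl]
              have h3 := ih3 2 (by omega)
              norm_num
              exact h3
            · intro b hb
              dsimp only [pvGA, List.map_cons]
              rw [if_pos hlen]
              simp only [hx, pvSkipBlanks, if_pos rfl]
              have hne : (b + 1 == 2) = false := by simp; omega
              simp only [hne, Bool.false_eq_true, if_false, List.nil_append]
              exact ih3 (b + 1) (by omega)
          · have hlen : (PySem.Str.len (PySem.Str.rstrip x) == 0) = false := by
              by_contra h
              exact hx ((pvLen_eq_zero_iff _).mp (by simpa using h))
            have hcond : ¬ ((PySem.Str.len (PySem.Str.rstrip x) == 0) = true) := by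
              rw [hlen]; simp
            refine ⟨?_, ?_, ?_⟩
            · dsimp only [pvGA, List.map_cons]
              rw [if_neg hcond, pvEmitRuns]
              simp [hx, ih1]
            · dsimp only [pvGA, List.map_cons]
              rw [if_neg hcond]
              simp only [pvSkipBlanks, if_neg hx]
              rw [pvEmitRuns]
              simp [hx, ih1]
            · intro b hb
              dsimp only [pvGA, List.map_cons]
              rw [if_neg hcond]
              simp only [pvSkipBlanks, if_neg hx]
              rw [pvEmitRuns]
              simp [hx, ih1]

-- ===== VERDICT (by name: the statement is the Claim_ definition above) =====
theorem genStripLongBlanks_spec : Claim_equal_genStripLongBlanks := by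
  intro storyLines _
  unfold Spec_genStripLongBlanks genStripLongBlanks genStripLongBlanks_alt
  rw [pvFoldl_eq_gA]
  simpa using (pvTriple storyLines.length storyLines (le_refl _)).1
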